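-- pv_equiv track=rewrite | github.com/kalaspuff/utcnow | utcnow/interface.py | get_error_options
-- ===== SOURCE A (Python) =====
-- from typing import List, Optional
--
-- def get_error_options(argv: List[str]) -> str:
--     return ", ".join(
--         [
--             v
--             for v in (argv if "--" not in argv else argv[: argv.index("--")])
--             if v.startswith("-") and not v[1:2].isdigit()
--         ]
--     )
-- ===== SOURCE B (Python) =====
-- from typing import List
--
-- def get_error_options(argv: List[str]) -> str:
--     # Traverse argv RIGHT-TO-LEFT, building the joined string directly
--     # (no intermediate list, no join): hitting any "--" discards everything
--     # collected so far, so the final string is exactly the options before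
--     # the first (leftmost) "--".
--     out = ""
--     for v in reversed(argv):
--         if v == "--":
--             out = ""
--         elif v.startswith("-") and not v[1:2].isdigit():
--             out = v if out == "" else v + ", " + out
--     return out
-- ===== Notes on version B (the rewrite author's own statement) =====
-- stated objective: alternative
-- what changed: Replaced membership-test + index() + slice + comprehension + join with a single right-to-left traversal that builds the joined string directly, resetting the accumulator whenever a '--' is seen (so the result is exactly the options before the first '--'), with no intermediate list and no join call.
import Mathlib
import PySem

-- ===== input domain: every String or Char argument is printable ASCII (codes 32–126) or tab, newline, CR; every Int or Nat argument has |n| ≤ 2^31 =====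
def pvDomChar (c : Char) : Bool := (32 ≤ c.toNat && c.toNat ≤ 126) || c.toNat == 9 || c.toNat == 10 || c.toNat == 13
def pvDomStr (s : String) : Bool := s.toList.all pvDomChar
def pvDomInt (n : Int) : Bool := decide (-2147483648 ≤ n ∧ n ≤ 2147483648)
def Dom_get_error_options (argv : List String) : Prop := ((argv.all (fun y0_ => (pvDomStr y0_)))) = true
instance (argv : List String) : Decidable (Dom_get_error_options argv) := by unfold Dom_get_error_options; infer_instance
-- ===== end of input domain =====

-- B replaces A's membership-test + index() + slice + comprehension + join with one right-to-left
-- traversal that builds the joined string directly, resetting its accumulator at each "--"; objective: alternative.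

-- ===== PORT A =====
-- the comprehension's predicate: v.startswith("-") and not v[1:2].isdigit()
def pvErrOptPred (v : String) : Bool :=
  PySem.Str.startswith v "-" && !(PySem.Str.strIsdigit (PySem.Str.slice v (some 1) (some 2)))

def get_error_options (argv : List String) : String :=
  let base : List String :=
    -- 'argv if "--" not in argv else argv[: argv.index("--")]'
    match PySem.List.index? argv "--" with
    | none => argv
    | some k => PySem.List.slice argv none (some (k : Int))
  PySem.Str.join ", " (base.filter pvErrOptPred)

-- ===== PORT B =====
-- one step of the reversed loop; the string accumulator 'out' is kept as its character list
def pvStepB (out : List Char) (v : String) : List Char :=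
  if v = "--" then []
  else if pvErrOptPred v then (if out = [] then v.toList else v.toList ++ (", ").toList ++ out)
  else out

def get_error_options_alt (argv : List String) : String :=
  String.ofList (argv.reverse.foldl pvStepB [])

-- ===== PRECONDITION & SPEC =====
def Spec_get_error_options (argv : List String) (out : String) : Prop := out = get_error_options_alt argv
instance (argv : List String) (out : String) : Decidable (Spec_get_error_options argv out) := by unfold Spec_get_error_options; infer_instance

-- ===== CLAIM (what is proved, stated in full; the proofs are below) =====
def Claim_equal_get_error_options : Prop := ∀ (argv : List String), Dom_get_error_options argv → Spec_get_error_options argv (get_error_options argv)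

-- ===== LEMMAS AND PROOFS =====
-- proof-only helper: the list of kept options before the first "--"
def pvErrOptCollect : List String → List String
  | [] => []
  | v :: rest =>
      if v = "--" then []
      else if pvErrOptPred v then v :: pvErrOptCollect rest
      else pvErrOptCollect rest

theorem pvErrOpt_base_filter (argv : List String) :
    (match PySem.List.index? argv "--" with
      | none => argv
      | some k => PySem.List.slice argv none (some (k : Int))).filter pvErrOptPred
      = pvErrOptCollect argv := by
  induction argv with
  | nil => simp [pvErrOptCollect, PySem.List.index?]
  | cons v rest ih =>
    by_cases hv : v = "--"
    · subst hv
      rw [PySem.List.index?_cons_self]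
      simp only [PySem.List.slice_to_natCast, List.take_zero, List.filter_nil, pvErrOptCollect]
      simp
    · rw [PySem.List.index?_cons_of_ne rest hv]
      cases hidx : PySem.List.index? rest "--" with
      | none =>
        rw [hidx] at ih
        simp only [Option.map_none]
        simp only at ih
        simp only [List.filter_cons, pvErrOptCollect, if_neg hv]
        by_cases hp : pvErrOptPred v = true <;> simp [hp, ih]
      | some k =>
        rw [hidx] at ih
        simp only [Option.map_some]
        simp only at ih
        have hsl : PySem.List.slice (v :: rest) none (some ((k + 1 : Nat) : Int))
            = v :: PySem.List.slice rest none (some ((k : Nat) : Int)) := by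
          rw [PySem.List.slice_to_natCast, PySem.List.slice_to_natCast]
          simp [List.take_succ_cons]
        rw [hsl, PySem.List.slice_to_natCast] at *
        simp only [List.filter_cons, pvErrOptCollect, if_neg hv]
        by_cases hp : pvErrOptPred v = true <;> simp [hp, ih]

-- every collected option satisfies the predicate, hence starts with "-", hence is nonempty
theorem pvErrOptCollect_pred {v : String} {xs : List String} (h : v ∈ pvErrOptCollect xs) :
    pvErrOptPred v = true := by
  induction xs with
  | nil => simp [pvErrOptCollect] at h
  | cons x rest ih =>
    unfold pvErrOptCollect at h
    split_ifs at h with h1 h2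
    · simp at h
    · rcases List.mem_cons.mp h with rfl | h3
      · exact h2
      · exact ih h3
    · exact ih h

theorem pvErrOptPred_toList_ne_nil {v : String} (h : pvErrOptPred v = true) : v.toList ≠ [] := by
  intro hnil
  have : v = "" := String.toList_inj.mp (by simpa using hnil)
  subst this
  simp [pvErrOptPred, PySem.Str.startswith, PySem.Chars.startswith] at h

-- a nonempty join of nonempty pieces is nonempty
theorem pvJoin_ne_nil {w : String} {ws : List String}
    (hall : ∀ v ∈ w :: ws, v.toList ≠ []) :
    PySem.Chars.join (", ").toList ((w :: ws).map String.toList) ≠ [] := by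
  cases ws with
  | nil =>
    simp only [List.map, PySem.Chars.join_singleton]
    exact hall w (by simp)
  | cons u us =>
    simp only [List.map, PySem.Chars.join_cons_cons]
    intro hnil
    exact hall w (by simp) (by simpa using (List.append_eq_nil_iff.mp
      (List.append_eq_nil_iff.mp hnil).1).1)

-- the reversed loop computes the join of the collected options
theorem pvStepB_foldr (argv : List String) :
    argv.foldr (fun v acc => pvStepB acc v) []
      = PySem.Chars.join (", ").toList ((pvErrOptCollect argv).map String.toList) := by
  induction argv with
  | nil => simp [pvErrOptCollect, PySem.Chars.join_nil]
  | cons v rest ih =>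
    have hcol : pvErrOptCollect (v :: rest)
        = if v = "--" then []
          else if pvErrOptPred v then v :: pvErrOptCollect rest else pvErrOptCollect rest := rfl
    simp only [List.foldr_cons, ih, hcol]
    unfold pvStepB
    by_cases hv : v = "--"
    · simp [hv, PySem.Chars.join_nil]
    · simp only [if_neg hv]
      by_cases hp : pvErrOptPred v = true
      · simp only [if_pos hp]
        cases hc : pvErrOptCollect rest with
        | nil => simp [hc, PySem.Chars.join_nil, PySem.Chars.join_singleton]
        | cons w ws =>
          have hne : PySem.Chars.join (", ").toList ((w :: ws).map String.toList) ≠ [] :=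
            pvJoin_ne_nil (by
              intro u hu
              exact pvErrOptPred_toList_ne_nil (pvErrOptCollect_pred (hc ▸ hu)))
          simp only [hc, List.map] at hne ⊢
          simp only [if_neg hne, PySem.Chars.join_cons_cons]
      · simp [hp]

-- ===== VERDICT (by name: the statement is the Claim_ definition above) =====
theorem get_error_options_spec : Claim_equal_get_error_options := by
  intro argv _
  unfold Spec_get_error_options get_error_options get_error_options_alt
  rw [List.foldl_reverse, pvStepB_foldr, ← pvErrOpt_base_filter]
  rfl
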